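-- pv_equiv track=rewrite | github.com/AlreadyMasos/tetrik_jun_test | third_task.py | create_intervals_list
-- ===== SOURCE A (Python) =====
-- def create_intervals_list(dictionary):
--     def check_index(index):
--         return 1 if index % 2 == 0 else -1
--
--     start_list = list()
--     for key in dictionary:
--         new_elem = dictionary[key]
--         for i, obj in enumerate(new_elem):
--             start_list.append((obj, check_index(i)))
--     return sorted(start_list)
-- ===== SOURCE B (Python) =====
-- def create_intervals_list(dictionary):
--     start_list = []
--     for seq in dictionary.values():
--         start_list += [(x, 1) for x in seq[::2]]
--         start_list += [(x, -1) for x in seq[1::2]]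
--     return sorted(start_list)
-- ===== Notes on version B (the rewrite author's own statement) =====
-- stated objective: alternative
-- what changed: Replaces the per-element enumerate/parity-branch loop with two strided slices per value (seq[::2] tagged +1, seq[1::2] tagged -1) concatenated and sorted.
import Mathlib
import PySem

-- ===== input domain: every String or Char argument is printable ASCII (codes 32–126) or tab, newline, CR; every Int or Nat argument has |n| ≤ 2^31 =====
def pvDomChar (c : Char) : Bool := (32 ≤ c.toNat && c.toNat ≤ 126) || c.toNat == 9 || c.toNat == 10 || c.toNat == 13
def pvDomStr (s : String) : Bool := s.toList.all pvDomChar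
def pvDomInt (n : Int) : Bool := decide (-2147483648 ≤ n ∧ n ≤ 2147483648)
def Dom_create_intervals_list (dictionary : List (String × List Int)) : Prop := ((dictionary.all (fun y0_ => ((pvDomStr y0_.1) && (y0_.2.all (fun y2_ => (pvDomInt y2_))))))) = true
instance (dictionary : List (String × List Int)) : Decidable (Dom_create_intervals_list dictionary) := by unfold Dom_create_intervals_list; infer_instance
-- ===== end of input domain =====

-- B replaces A's enumerate/index-parity loop by two strided slices per value (seq[::2] tagged +1, seq[1::2] tagged -1); a different decomposition, same cost.

-- ===== PORT A =====
-- A iterates the dict's keys and looks each value up; on the association list this is the pairs in order.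
def create_intervals_list (dictionary : List (String × List Int)) : List (Int × Int) :=
  let check_index : Int → Int := fun index => if index % 2 == 0 then 1 else -1
  let start_list : List (Int × Int) :=
    dictionary.foldl
      (fun acc kv =>
        (PySem.List.enumerate kv.2).foldl
          (fun acc2 io => acc2 ++ [(io.2, check_index io.1)]) acc)
      []
  PySem.List.sorted2 start_list Prod.fst Prod.snd

-- ===== PORT B =====
def create_intervals_list_alt (dictionary : List (String × List Int)) : List (Int × Int) :=
  let start_list : List (Int × Int) :=
    dictionary.foldl
      (fun acc kv =>
        (acc ++ ((PySem.List.slice? kv.2 none none 2).getD []).map (fun x => (x, (1 : Int))))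
            ++ ((PySem.List.slice? kv.2 (some 1) none 2).getD []).map (fun x => (x, (-1 : Int))))
      []
  PySem.List.sorted2 start_list Prod.fst Prod.snd

-- ===== PRECONDITION & SPEC =====
def Spec_create_intervals_list (dictionary : List (String × List Int)) (out : List (Int × Int)) : Prop := out = create_intervals_list_alt dictionary
instance (dictionary : List (String × List Int)) (out : List (Int × Int)) : Decidable (Spec_create_intervals_list dictionary out) := by unfold Spec_create_intervals_list; infer_instance

-- ===== CLAIM (what is proved, stated in full; the proofs are below) =====
def Claim_equal_create_intervals_list : Prop := ∀ (dictionary : List (String × List Int)), Dom_create_intervals_list dictionary → Spec_create_intervals_list dictionary (create_intervals_list dictionary)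

-- ===== LEMMAS AND PROOFS =====

-- even-index and odd-index elements of a list
def pvEvens : List Int → List Int
  | [] => []
  | [a] => [a]
  | a :: _ :: t => a :: pvEvens t

def pvOdds : List Int → List Int
  | [] => []
  | _ :: t => pvEvens t

lemma pvEvens_cons (a : Int) (t : List Int) : pvEvens (a :: t) = a :: pvOdds t := by
  cases t <;> simp [pvEvens, pvOdds]

lemma pvFmE (xs : List Int) :
    List.filterMap (fun k : Nat => xs[2 * k]?) (List.range ((xs.length + 1) / 2)) = pvEvens xs := by
  induction xs using pvEvens.induct with
  | case1 => simp [pvEvens]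
  | case2 a => simp [pvEvens, List.range_succ]
  | case3 a b t ih =>
    have hc : (a :: b :: t).length.succ / 2 = (t.length + 1) / 2 + 1 := by
      simp only [List.length_cons]; omega
    simp only [List.length_cons]
    rw [show (t.length + 1 + 1 + 1) / 2 = (t.length + 1) / 2 + 1 by omega,
        List.range_succ_eq_map, List.filterMap_cons, List.filterMap_map]
    have hf : ∀ k : Nat, ((fun k : Nat => (a :: b :: t)[2 * k]?) ∘ Nat.succ) k
        = (fun k : Nat => t[2 * k]?) k := by
      intro k
      simp only [Function.comp]
      rw [show 2 * Nat.succ k = (2 * k) + 1 + 1 by omega]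
      simp
    rw [List.filterMap_congr (fun k _ => hf k)]
    simp [pvEvens, ih]

-- seq[::2] and seq[1::2]
lemma slice?_two (xs : List Int) : PySem.List.slice? xs none none 2 = some (pvEvens xs) := by
  simp only [PySem.List.slice?, PySem.List.sliceIndices]
  norm_num
  have hcnt : (if 0 < xs.length then (((xs.length : Int) + 2 - 1) / 2).toNat else 0)
      = (xs.length + 1) / 2 := by
    split_ifs with h <;> omega
  rw [hcnt]
  have hfun : ∀ k ∈ List.range ((xs.length + 1) / 2),
      xs[((2 : Int) * (k : Int)).toNat]? = xs[2 * k]? := by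
    intro k _
    rw [show ((2 : Int) * (k : Int)).toNat = 2 * k by omega]
  rw [List.filterMap_congr hfun, pvFmE]

lemma slice?_one_two (xs : List Int) : PySem.List.slice? xs (some 1) none 2 = some (pvOdds xs) := by
  cases xs with
  | nil => rfl
  | cons a t =>
    simp only [PySem.List.slice?, PySem.List.sliceIndices]
    norm_num
    have hcnt : (if 0 < t.length then (((t.length : Int) + 2 - 1) / 2).toNat else 0)
        = (t.length + 1) / 2 := by
      split_ifs with h <;> omega
    rw [hcnt]
    have hfun : ∀ k ∈ List.range ((t.length + 1) / 2),
        (a :: t)[((1 : Int) + 2 * (k : Int)).toNat]? = t[2 * k]? := by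
      intro k _
      rw [show ((1 : Int) + 2 * (k : Int)).toNat = 2 * k + 1 by omega]
      simp
    rw [List.filterMap_congr hfun, pvFmE]
    simp [pvOdds]

-- the tagging function of A
def pvTagF (io : Int × Int) : Int × Int := (io.2, if io.1 % 2 == 0 then 1 else -1)

def pvTagA (seq : List Int) : List (Int × Int) := (PySem.List.enumerate seq).map pvTagF

def pvTagB (seq : List Int) : List (Int × Int) :=
  (pvEvens seq).map (fun x => (x, (1 : Int))) ++ (pvOdds seq).map (fun x => (x, (-1 : Int)))

lemma map_enumerate_shift2 (seq : List Int) : ∀ s : Int,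
    (PySem.List.enumerate seq (s + 2)).map pvTagF = (PySem.List.enumerate seq s).map pvTagF := by
  induction seq with
  | nil => intro s; simp [PySem.List.enumerate]
  | cons a t ih =>
    intro s
    rw [PySem.List.enumerate_cons, PySem.List.enumerate_cons]
    have h2 : s + 2 + 1 = (s + 1) + 2 := by ring
    simp only [List.map_cons, h2, ih (s + 1)]
    congr 1
    simp [pvTagF]

lemma pvTagA_cons2 (a b : Int) (t : List Int) :
    pvTagA (a :: b :: t) = (a, 1) :: (b, -1) :: pvTagA t := by
  unfold pvTagA
  rw [PySem.List.enumerate_cons, PySem.List.enumerate_cons]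
  norm_num
  have := map_enumerate_shift2 t 0
  norm_num at this
  rw [this]
  constructor
  · simp [pvTagF]
  · simp [pvTagF]

lemma pvTagA_perm_pvTagB (seq : List Int) : (pvTagA seq).Perm (pvTagB seq) := by
  induction seq using pvEvens.induct with
  | case1 => simp [pvTagA, pvTagB, PySem.List.enumerate, pvEvens, pvOdds]
  | case2 a =>
    simp [pvTagA, pvTagB, PySem.List.enumerate, pvEvens, pvOdds, pvTagF]
  | case3 a b t ih =>
    rw [pvTagA_cons2]
    have hB : pvTagB (a :: b :: t)
        = (a, 1) :: ((pvEvens t).map (fun x => (x, (1 : Int))) ++ ((b, -1) :: (pvOdds t).map (fun x => (x, (-1 : Int))))) := by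
      simp [pvTagB, pvEvens, pvOdds, pvEvens_cons]
    rw [hB]
    refine List.Perm.cons _ ?_
    refine List.Perm.trans ?_ List.perm_middle.symm
    exact List.Perm.cons _ ih

lemma flatMap_perm_of_forall {α β : Type} (l : List α) (f g : α → List β)
    (h : ∀ a ∈ l, (f a).Perm (g a)) : (l.flatMap f).Perm (l.flatMap g) := by
  induction l with
  | nil => simp
  | cons a t ih =>
    simp only [List.flatMap_cons]
    exact List.Perm.append (h a (by simp)) (ih (fun x hx => h x (by simp [hx])))

lemma pvFlatMapSingleton {α β : Type} (g : α → β) (l : List α) :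
    l.flatMap (fun x => [g x]) = l.map g := by
  induction l with
  | nil => rfl
  | cons a t ih => simp [List.flatMap_cons, ih]

-- A's accumulated list is the flatMap of pvTagA
lemma listA_eq (dictionary : List (String × List Int)) :
    dictionary.foldl
      (fun acc kv =>
        (PySem.List.enumerate kv.2).foldl
          (fun acc2 io => acc2 ++ [(io.2, if io.1 % 2 == 0 then (1:Int) else -1)]) acc)
      []
    = dictionary.flatMap (fun kv => pvTagA kv.2) := by
  have hstep : ∀ (acc : List (Int × Int)) (kv : String × List Int),
      (PySem.List.enumerate kv.2).foldl
        (fun acc2 io => acc2 ++ [(io.2, if io.1 % 2 == 0 then (1:Int) else -1)]) acc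
      = acc ++ pvTagA kv.2 := by
    intro acc kv
    rw [PySem.List.foldl_append_eq_flatMap
      (fun io : Int × Int => [(io.2, if io.1 % 2 == 0 then (1:Int) else -1)])
      (PySem.List.enumerate kv.2) acc]
    congr 1
    exact pvFlatMapSingleton pvTagF (PySem.List.enumerate kv.2)
  calc dictionary.foldl
        (fun acc kv =>
          (PySem.List.enumerate kv.2).foldl
            (fun acc2 io => acc2 ++ [(io.2, if io.1 % 2 == 0 then (1:Int) else -1)]) acc) []
      = dictionary.foldl (fun acc kv => acc ++ pvTagA kv.2) [] := by
        have hfun : (fun (acc : List (Int × Int)) (kv : String × List Int) =>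
            (PySem.List.enumerate kv.2).foldl
              (fun acc2 io => acc2 ++ [(io.2, if io.1 % 2 == 0 then (1:Int) else -1)]) acc)
            = fun acc kv => acc ++ pvTagA kv.2 := by
          funext acc kv; exact hstep acc kv
        rw [hfun]
    _ = dictionary.flatMap (fun kv => pvTagA kv.2) := by
        rw [PySem.List.foldl_append_eq_flatMap]; simp

-- B's accumulated list is the flatMap of pvTagB
lemma listB_eq (dictionary : List (String × List Int)) :
    dictionary.foldl
      (fun acc kv =>
        (acc ++ ((PySem.List.slice? kv.2 none none 2).getD []).map (fun x => (x, (1 : Int))))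
            ++ ((PySem.List.slice? kv.2 (some 1) none 2).getD []).map (fun x => (x, (-1 : Int))))
      []
    = dictionary.flatMap (fun kv => pvTagB kv.2) := by
  have hstep : (fun (acc : List (Int × Int)) (kv : String × List Int) =>
        (acc ++ ((PySem.List.slice? kv.2 none none 2).getD []).map (fun x => (x, (1 : Int))))
            ++ ((PySem.List.slice? kv.2 (some 1) none 2).getD []).map (fun x => (x, (-1 : Int))))
      = fun acc kv => acc ++ pvTagB kv.2 := by
    funext acc kv
    rw [slice?_two, slice?_one_two]
    simp [pvTagB]
  rw [hstep, PySem.List.foldl_append_eq_flatMap]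
  simp

-- the lexicographic (tuple) order Python sorts pairs by
def pvLexLE (p q : Int × Int) : Prop := p.1 < q.1 ∨ (p.1 = q.1 ∧ p.2 ≤ q.2)

lemma pvLexLE_trans {a b c : Int × Int} (h1 : pvLexLE a b) (h2 : pvLexLE b c) : pvLexLE a c := by
  unfold pvLexLE at *; omega

def pvBefore (a b : Int × Int) : Bool :=
  decide (a.1 < b.1) || (!decide (b.1 < a.1) && decide (a.2 < b.2))

lemma pvBefore_true {a b : Int × Int} (h : pvBefore a b = true) : pvLexLE a b := by
  unfold pvBefore at h; unfold pvLexLE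
  simp at h; omega

lemma pvBefore_false {a b : Int × Int} (h : pvBefore a b = false) : pvLexLE b a := by
  unfold pvBefore at h; unfold pvLexLE
  simp at h; omega

lemma insertBy_pairwise_lex (x : Int × Int) (ys : List (Int × Int))
    (h : List.Pairwise pvLexLE ys) :
    List.Pairwise pvLexLE (PySem.List.insertBy pvBefore x ys) := by
  induction ys with
  | nil => simp [PySem.List.insertBy]
  | cons y t ih =>
    rw [List.pairwise_cons] at h
    by_cases hb : pvBefore x y = true
    · rw [show PySem.List.insertBy pvBefore x (y :: t) = x :: y :: t by
        simp [PySem.List.insertBy, hb]]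
      refine List.Pairwise.cons ?_ (List.Pairwise.cons h.1 h.2)
      intro z hz
      rcases List.mem_cons.mp hz with rfl | hz
      · exact pvBefore_true hb
      · exact pvLexLE_trans (pvBefore_true hb) (h.1 z hz)
    · rw [show PySem.List.insertBy pvBefore x (y :: t) = y :: PySem.List.insertBy pvBefore x t by
        simp [PySem.List.insertBy, hb]]
      refine List.Pairwise.cons ?_ (ih h.2)
      intro z hz
      have hz' : z = x ∨ z ∈ t := by
        have := (PySem.List.insertBy_perm pvBefore x t).mem_iff.mp hz
        simpa using this
      rcases hz' with rfl | hz'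
      · exact pvBefore_false (by simpa using hb)
      · exact h.1 z hz'

lemma sorted2_eq_insertBy_fold (xs : List (Int × Int)) :
    PySem.List.sorted2 xs Prod.fst Prod.snd
      = xs.foldl (fun acc x => PySem.List.insertBy pvBefore x acc) [] := by
  rfl

lemma pairwise_sorted2 (xs : List (Int × Int)) :
    List.Pairwise pvLexLE (PySem.List.sorted2 xs Prod.fst Prod.snd) := by
  rw [sorted2_eq_insertBy_fold]
  suffices h : ∀ acc : List (Int × Int), List.Pairwise pvLexLE acc →
      List.Pairwise pvLexLE (xs.foldl (fun acc x => PySem.List.insertBy pvBefore x acc) acc) by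
    exact h [] (by simp)
  induction xs with
  | nil => intro acc hacc; simpa using hacc
  | cons a t ih =>
    intro acc hacc
    exact ih _ (insertBy_pairwise_lex a acc hacc)

lemma sorted2_eq_of_perm (xs ys : List (Int × Int)) (h : xs.Perm ys) :
    PySem.List.sorted2 xs Prod.fst Prod.snd = PySem.List.sorted2 ys Prod.fst Prod.snd := by
  apply List.eq_of_perm_of_sorted (le := pvLexLE)
  · intro a b _ _ h1 h2
    unfold pvLexLE at h1 h2
    ext <;> omega
  · exact pairwise_sorted2 xs
  · exact pairwise_sorted2 ys
  · exact ((PySem.List.sorted2_perm xs Prod.fst Prod.snd false).trans h).trans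
      (PySem.List.sorted2_perm ys Prod.fst Prod.snd false).symm

-- ===== VERDICT (by name: the statement is the Claim_ definition above) =====
theorem create_intervals_list_spec : Claim_equal_create_intervals_list := by
  intro dictionary _
  unfold Spec_create_intervals_list create_intervals_list create_intervals_list_alt
  simp only []
  rw [listA_eq, listB_eq]
  exact sorted2_eq_of_perm _ _
    (flatMap_perm_of_forall dictionary _ _ (fun kv _ => pvTagA_perm_pvTagB kv.2))
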